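-- pv_equiv track=rewrite | github.com/TokisakiKurumi2001/frequency_of_char_in_string | frequency_of_char_in_string/Python/freqofchar.py | freqOfCharInStr
-- ===== SOURCE A (Python) =====
-- def freqOfCharInStr(string):
--     # convert string to array
--     my_list = list(string)
--
--     # declare an empty dictionary
--     my_dict = {}
--
--     # run variable
--     i = 0
--     j = 0
--     # frequency of char
--     count = 0
--     # get the number of elements in list
--     length = len(my_list)
--
--     # loop through the list
--     while(i < length):
--         # every character appears at least once
--         count = 1
--         # if we hit the last char, put the data of char(my_list[i]) and count(which is defaultly 1) into the dictionary `my_dict`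
--         if(i == length - 1):
--             my_dict[my_list[i]] = count
--             # then exit the loop, since we reach the last element
--             break
--         else:
--             # if not, get the next index
--             j = i + 1
--
--
--         # compare 2 consecutive elements in the list, if they are the same
--         #  increase the `count` by 1
--         #  delete second char from the list(del my_list[j]), my_list[j]:char you want to delete from the list
--         #  decrease the length by 1
--         while(my_list[i] == my_list[j]):
--             count += 1
--             del my_list[j]
--             length -= 1
--             # if we reach the last character when remove char, exit the loop
--             if(i == length - 1):
--                 break
--
--
--         # put the char and its current freq(count) into the dictionary
--         my_dict[my_list[i]] = count
--         # increase the run vairable so that it won't cause the infinite loop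
--         i += 1
--
--
--     # give back the dictionary
--     return my_dict
-- ===== SOURCE B (Python) =====
-- def freqOfCharInStr(string):
--     # single left-to-right pass over consecutive runs; overwrite run length into the dict
--     my_dict = {}
--     i = 0
--     n = len(string)
--     while i < n:
--         c = string[i]
--         j = i + 1
--         while j < n and string[j] == c:
--             j += 1
--         my_dict[c] = j - i
--         i = j
--     return my_dict
-- ===== Notes on version B (the rewrite author's own statement) =====
-- stated objective: faster
-- what changed: B replaces A's quadratic scheme (repeatedly deleting each duplicate from the list with del, an O(n) operation per deleted char) by a single left-to-right pass that measures each consecutive run and overwrites its length into the dict.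
import Mathlib
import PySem

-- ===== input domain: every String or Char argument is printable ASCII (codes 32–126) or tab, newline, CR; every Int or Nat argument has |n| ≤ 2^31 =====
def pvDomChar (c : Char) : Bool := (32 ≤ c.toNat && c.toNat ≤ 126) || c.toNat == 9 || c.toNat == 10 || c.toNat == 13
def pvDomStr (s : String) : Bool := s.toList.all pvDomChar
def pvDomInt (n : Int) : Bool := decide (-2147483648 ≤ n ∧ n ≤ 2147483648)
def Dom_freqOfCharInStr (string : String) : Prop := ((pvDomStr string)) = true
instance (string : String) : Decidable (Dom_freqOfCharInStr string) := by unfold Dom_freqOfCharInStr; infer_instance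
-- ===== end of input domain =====

-- B replaces A's quadratic delete-from-the-list scan by a single pass over consecutive runs,
-- overwriting each run's length into the dict (objective: faster).

-- ===== PORT A =====
-- inner while loop: while my_list[i] == my_list[j] (j = i+1, fixed): count += 1; del my_list[j];
-- length -= 1; if i == length - 1: break.  (in Python both reads are in range whenever the loop
-- re-checks; the getElem? comparison below is exact on those reachable states)
def pvAInner (xs : List Char) (i : Nat) (count : Int) (len : Nat) :
    List Char × Int × Nat :=
  if h : i + 1 < xs.length ∧ xs[i]? = xs[i + 1]? then
    let xs' := xs.eraseIdx (i + 1)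
    if i = len - 1 - 1 then (xs', count + 1, len - 1)
    else pvAInner xs' i (count + 1) (len - 1)
  else (xs, count, len)
termination_by xs.length
decreasing_by
  have := h.1
  simp only [List.length_eraseIdx, if_pos this]
  omega

-- termination helper for the outer loop: the inner loop never increases `length`
theorem pvAInner_len_le (xs : List Char) (i : Nat) (count : Int) (len : Nat) :
    (pvAInner xs i count len).2.2 ≤ len := by
  fun_induction pvAInner xs i count len
  all_goals try simp
  all_goals omega

-- outer while loop: i runs over the (mutated) list; at the last index store count = 1 and break,
-- else run the inner loop, store my_dict[my_list[i]] = count, i += 1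
def pvAOuter (xs : List Char) (d : PySem.Dict String Int) (i len : Nat) :
    PySem.Dict String Int :=
  if _h : i < len then
    match xs[i]? with
    | none => d
    | some c =>
      if i = len - 1 then d.insert (String.ofList [c]) 1
      else
        match hr : pvAInner xs i 1 len with
        | (xs2, count2, len2) =>
          match xs2[i]? with
          | none => d
          | some c' => pvAOuter xs2 (d.insert (String.ofList [c']) count2) (i + 1) len2
  else d
termination_by len - i
decreasing_by
  have hle := pvAInner_len_le xs i 1 len
  rw [hr] at hle
  simp at hle
  omega

def freqOfCharInStr (string : String) : List (String × Int) :=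
  (pvAOuter string.toList PySem.Dict.empty 0 string.toList.length).items

-- ===== PORT B =====
-- one pass: for each run head c, scan the matching run (the inner `while string[j] == c: j += 1`),
-- store the run length, continue after the run
def pvBGo (xs : List Char) (d : PySem.Dict String Int) : PySem.Dict String Int :=
  match xs with
  | [] => d
  | c :: rest =>
      pvBGo (rest.dropWhile (· == c))
        (d.insert (String.ofList [c]) (1 + ((rest.takeWhile (· == c)).length : Int)))
termination_by xs.length
decreasing_by
  have := List.length_dropWhile_le (p := (· == c)) (l := rest)
  simp at *; omega

def freqOfCharInStr_alt (string : String) : List (String × Int) :=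
  (pvBGo string.toList PySem.Dict.empty).items

-- ===== PRECONDITION & SPEC =====
def Spec_freqOfCharInStr (string : String) (out : List (String × Int)) : Prop := out = freqOfCharInStr_alt string
instance (string : String) (out : List (String × Int)) : Decidable (Spec_freqOfCharInStr string out) := by unfold Spec_freqOfCharInStr; infer_instance

-- ===== CLAIM (what is proved, stated in full; the proofs are below) =====
def Claim_equal_freqOfCharInStr : Prop := ∀ (string : String), Dom_freqOfCharInStr string → Spec_freqOfCharInStr string (freqOfCharInStr string)

-- ===== LEMMAS AND PROOFS =====

-- one-step unfolding of B's run scan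
theorem pvBGo_cons (c : Char) (rest : List Char) (d : PySem.Dict String Int) :
    pvBGo (c :: rest) d
      = pvBGo (rest.dropWhile (· == c))
          (d.insert (String.ofList [c]) (1 + ((rest.takeWhile (· == c)).length : Int))) := by
  rw [pvBGo]

-- the inner loop deletes exactly the run of c following position i and counts it
theorem pvAInner_spec (rest pre : List Char) (c : Char) (count : Int) :
    pvAInner (pre ++ c :: rest) pre.length count (pre.length + 1 + rest.length)
      = (pre ++ c :: rest.dropWhile (· == c),
         count + ((rest.takeWhile (· == c)).length : Int),
         pre.length + 1 + (rest.dropWhile (· == c)).length) := by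
  induction rest generalizing count with
  | nil =>
      rw [pvAInner, dif_neg (by simp)]
      simp
  | cons b rest2 ih =>
      by_cases hbc : b = c
      · subst hbc
        rw [pvAInner]
        have h1 : (pre ++ b :: b :: rest2)[pre.length]? = some b := by
          simp
        have h2 : (pre ++ b :: b :: rest2)[pre.length + 1]? = some b := by
          rw [List.getElem?_append_right (by omega)]
          simp
        rw [dif_pos ⟨by simp, by rw [h1, h2]⟩]
        have herase : (pre ++ b :: b :: rest2).eraseIdx (pre.length + 1)
            = pre ++ b :: rest2 := by
          rw [List.eraseIdx_append_of_length_le (by omega)]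
          simp
        by_cases hend : rest2 = []
        · subst hend
          rw [if_pos (by simp)]
          rw [herase]
          simp
        · rw [if_neg (by
            have : rest2.length ≠ 0 := by simpa using hend
            simp
            omega)]
          rw [herase]
          have hlen2 : pre.length + 1 + (b :: rest2).length - 1
              = pre.length + 1 + rest2.length := by simp
          rw [hlen2, ih (count + 1)]
          simp
          ring
      · rw [pvAInner]
        have h1 : (pre ++ c :: b :: rest2)[pre.length]? = some c := by
          simp
        have h2 : (pre ++ c :: b :: rest2)[pre.length + 1]? = some b := by
          rw [List.getElem?_append_right (by omega)]
          simp
        rw [dif_neg (by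
          rintro ⟨-, heq⟩
          rw [h1, h2] at heq
          exact hbc (by simpa using heq.symm))]
        simp [hbc]

-- the outer loop over the deduped prefix ++ remaining suffix is B's run scan over the suffix
theorem pvAOuter_spec (n : Nat) (suffix pre : List Char) (d : PySem.Dict String Int)
    (hn : suffix.length ≤ n) :
    pvAOuter (pre ++ suffix) d pre.length (pre.length + suffix.length) = pvBGo suffix d := by
  induction n generalizing suffix pre d with
  | zero =>
      have hs : suffix = [] := by
        cases suffix with
        | nil => rfl
        | cons a l => simp at hn
      subst hs
      rw [pvAOuter, dif_neg (by simp), pvBGo]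
  | succ n ih =>
      cases suffix with
      | nil =>
          rw [pvAOuter, dif_neg (by simp), pvBGo]
      | cons c rest =>
          rw [pvAOuter, dif_pos (by simp)]
          have h1 : (pre ++ c :: rest)[pre.length]? = some c := by simp
          split
          next heq => rw [h1] at heq; exact absurd heq (by simp)
          next c1 heq =>
            rw [h1] at heq
            injection heq with heq; subst heq
            cases rest with
            | nil =>
                rw [if_pos (by simp)]
                simp [pvBGo]
            | cons b rest2 =>
                rw [if_neg (by simp)]
                have hil : pre.length + (c :: b :: rest2).length
                    = pre.length + 1 + (b :: rest2).length := by simp; omega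
                rw [hil, pvAInner_spec (b :: rest2) pre c 1]
                split
                next xs2 count2 len2 hr =>
                injection hr with e1 hr
                injection hr with e2 e3
                subst e1; subst e2; subst e3
                have h1' : (pre ++ c :: (b :: rest2).dropWhile (· == c))[pre.length]? = some c := by
                  simp
                split
                next heq2 => rw [h1'] at heq2; exact absurd heq2 (by simp)
                next c2 heq2 =>
                  rw [h1'] at heq2
                  injection heq2 with heq2; subst heq2
                  have hassoc : pre ++ c :: (b :: rest2).dropWhile (· == c)
                      = (pre ++ [c]) ++ (b :: rest2).dropWhile (· == c) := by simp
                  have hlenpre : pre.length + 1 = (pre ++ [c]).length := by simp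
                  have hlen : pre.length + 1 + ((b :: rest2).dropWhile (· == c)).length
                      = (pre ++ [c]).length + ((b :: rest2).dropWhile (· == c)).length := by simp
                  rw [hassoc, hlenpre,
                    ih ((b :: rest2).dropWhile (· == c)) (pre ++ [c]) _
                      (by
                        have := List.length_dropWhile_le (p := (· == c)) (l := b :: rest2)
                        simp at this hn ⊢
                        omega)]
                  rw [pvBGo_cons]

-- ===== VERDICT (by name: the statement is the Claim_ definition above) =====
theorem freqOfCharInStr_spec : Claim_equal_freqOfCharInStr := by
  intro s _
  unfold Spec_freqOfCharInStr freqOfCharInStr freqOfCharInStr_alt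
  have h := pvAOuter_spec s.toList.length s.toList [] PySem.Dict.empty (le_refl _)
  simp only [List.nil_append, List.length_nil, Nat.zero_add] at h
  rw [h]
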